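-- pv_equiv track=rewrite | github.com/srutherford2000/advent_of_code_2023 | 12_03/12_03.py | get_number_index
-- ===== SOURCE A (Python) =====
-- def get_number_index(row):
--     all_num_idxs=[]
--     this_num_idx = []
--     for i,chr in enumerate(row):
--         if chr.isdigit():
--             this_num_idx.append(i)
--         elif len(this_num_idx) != 0:
--             all_num_idxs.append(this_num_idx)
--             this_num_idx = []
--
--     if len(this_num_idx) != 0:
--             all_num_idxs.append(this_num_idx)
--             this_num_idx = []
--
--     return all_num_idxs
-- ===== SOURCE B (Python) =====
-- def get_number_index(row):
--     # Pass 1: flat list of all digit positions; Pass 2: partition it into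
--     # maximal runs of consecutive integers (merge when the index extends the
--     # last run by exactly 1).
--     idxs = [i for i, c in enumerate(row) if c.isdigit()]
--     groups = []
--     for i in idxs:
--         if groups and groups[-1][-1] + 1 == i:
--             groups[-1].append(i)
--         else:
--             groups.append([i])
--     return groups
-- ===== Notes on version B (the rewrite author's own statement) =====
-- stated objective: alternative
-- what changed: A does one character scan carrying a pending-run buffer that it flushes on each non-digit; B is two passes: it first extracts the flat list of digit indices, then groups that index list purely by numeric adjacency (append to the last group iff the new index is last+1), with no character logic in the second pass.
import Mathlib
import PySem

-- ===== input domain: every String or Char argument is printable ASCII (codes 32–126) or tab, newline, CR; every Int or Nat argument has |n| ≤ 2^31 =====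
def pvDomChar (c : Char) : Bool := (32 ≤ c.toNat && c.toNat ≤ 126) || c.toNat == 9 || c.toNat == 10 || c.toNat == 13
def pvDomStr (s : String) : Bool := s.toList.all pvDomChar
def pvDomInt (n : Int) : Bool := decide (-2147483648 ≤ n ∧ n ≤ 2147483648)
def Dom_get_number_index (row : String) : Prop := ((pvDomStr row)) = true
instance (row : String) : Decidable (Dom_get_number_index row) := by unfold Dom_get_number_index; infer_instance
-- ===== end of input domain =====

-- B replaces A's single char-scan with pending buffer by two passes: extract digit
-- indices, then group the index list by numeric adjacency (objective: alternative).


-- ===== PORT A =====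
-- A's for-loop over enumerate(row), carrying (all_num_idxs, this_num_idx):
def getNumLoopA : List (Int × Char) → (List (List Int) × List Int) → (List (List Int) × List Int)
  | [], st => st
  | (i, c) :: rest, (all, cur) =>
    if PySem.Chars.isdigit c then getNumLoopA rest (all, cur ++ [i])
    else if cur.length ≠ 0 then getNumLoopA rest (all ++ [cur], [])
    else getNumLoopA rest (all, cur)

def get_number_index (row : String) : List (List Int) :=
  let st := getNumLoopA (PySem.List.enumerate row.toList) ([], [])
  if st.2.length ≠ 0 then st.1 ++ [st.2] else st.1

-- ===== PORT B =====
-- one step of B's grouping loop: groups[-1][-1] read via getLast? (groups' elements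
-- are always nonempty, so getLastD 0 is exact for groups[-1][-1])
def getNumStepB (groups : List (List Int)) (i : Int) : List (List Int) :=
  match groups.getLast? with
  | none => groups ++ [[i]]
  | some g =>
    if g.getLastD 0 + 1 = i then groups.dropLast ++ [g ++ [i]]
    else groups ++ [[i]]

def get_number_index_alt (row : String) : List (List Int) :=
  let idxs := (PySem.List.enumerate row.toList).filterMap
    (fun p => if PySem.Chars.isdigit p.2 then some p.1 else none)
  idxs.foldl getNumStepB []

-- ===== PRECONDITION & SPEC =====
def Spec_get_number_index (row : String) (out : List (List Int)) : Prop := out = get_number_index_alt row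
instance (row : String) (out : List (List Int)) : Decidable (Spec_get_number_index row out) := by unfold Spec_get_number_index; infer_instance

-- ===== CLAIM (what is proved, stated in full; the proofs are below) =====
def Claim_equal_get_number_index : Prop := ∀ (row : String), Dom_get_number_index row → Spec_get_number_index row (get_number_index row)

-- ===== LEMMAS AND PROOFS =====

-- the digit indices of the enumerated suffix, as B's first pass computes them
def digitIdxs (l : List (Int × Char)) : List Int :=
  l.filterMap (fun p => if PySem.Chars.isdigit p.2 then some p.1 else none)

-- finalize A's loop state (the trailing flush after the loop)
def finA (st : List (List Int) × List Int) : List (List Int) :=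
  if st.2.length ≠ 0 then st.1 ++ [st.2] else st.1

lemma stepB_append_last (all : List (List Int)) (cur : List Int) (i : Int)
    (h : cur.getLast? = some (i - 1)) :
    getNumStepB (all ++ [cur]) i = all ++ [cur ++ [i]] := by
  simp [getNumStepB, List.getLast?_append, List.getLastD_eq_getLast?, h]

lemma stepB_new_group (all : List (List Int)) (i : Int)
    (h : ∀ g, all.getLast? = some g → g.getLastD 0 + 1 ≠ i) :
    getNumStepB all i = all ++ [[i]] := by
  cases hg : all.getLast? with
  | none => simp [getNumStepB, hg]
  | some g =>
    have h' := h g hg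
    rw [List.getLastD_eq_getLast?] at h'
    simp [getNumStepB, hg, h']

-- main invariant: A's loop from position i with state (all, cur) equals B's fold
-- over the remaining digit indices started from the corresponding B state.
lemma key : ∀ (l : List (Int × Char)) (i : Int) (all : List (List Int)) (cur : List Int),
    (∀ p ∈ l, i ≤ p.1) →
    (∀ k, k < l.length → l[k]!.1 = i + k) →
    (cur = [] ∨ cur.getLast? = some (i - 1)) →
    (cur = [] → ∀ g, all.getLast? = some g → g.getLastD 0 + 1 < i) →
    finA (getNumLoopA l (all, cur)) =
      (digitIdxs l).foldl getNumStepB (all ++ (if cur = [] then [] else [cur])) := by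
  intro l
  induction l with
  | nil =>
    intro i all cur _ _ hcur _
    rcases hcur with h | h
    · simp [getNumLoopA, finA, digitIdxs, h]
    · have : cur ≠ [] := by intro e; simp [e] at h
      simp [getNumLoopA, finA, digitIdxs, this]
  | cons p rest ih =>
    intro i all cur hge hidx hcur hall
    obtain ⟨j, c⟩ := p
    have hj : i = j := by
      have := hidx 0 (by simp)
      simpa using this.symm
    subst hj
    have hge' : ∀ q ∈ rest, i + 1 ≤ q.1 := by
      intro q hq
      have hk : ∃ k, k < rest.length ∧ rest[k]! = q := by
        obtain ⟨k, hk, he⟩ := List.mem_iff_getElem.mp hq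
        exact ⟨k, hk, by simp [List.getElem!_eq_getElem?_getD, he, List.getElem?_eq_getElem hk]⟩
      obtain ⟨k, hk, he⟩ := hk
      have := hidx (k + 1) (by simpa using Nat.succ_lt_succ hk)
      have h2 : rest[k]!.1 = i + (↑k + 1) := by
        simpa using this
      rw [← he] at *
      omega
    have hidx' : ∀ k, k < rest.length → rest[k]!.1 = i + 1 + k := by
      intro k hk
      have := hidx (k + 1) (by simpa using Nat.succ_lt_succ hk)
      have h2 : ((i, c) :: rest)[k+1]! = rest[k]! := by
        simp [List.getElem!_eq_getElem?_getD]
      rw [h2] at this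
      push_cast at this ⊢
      omega
    by_cases hd : PySem.Chars.isdigit c
    · -- digit: A appends i to cur; B consumes index i
      have hstep : getNumStepB (all ++ (if cur = [] then [] else [cur])) i
          = all ++ [cur ++ [i]] := by
        rcases hcur with h | h
        · subst h
          simp only [reduceIte, List.append_nil]
          rw [stepB_new_group all i]
          · simp
          · intro g hg
            have := hall rfl g hg
            omega
        · have hne : cur ≠ [] := by intro e; simp [e] at h
          rw [if_neg hne, stepB_append_last all cur i h]
      have hrec := ih (i + 1) all (cur ++ [i]) hge' hidx'
        (Or.inr (by simp)) (by intro h; simp at h)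
      simp only [getNumLoopA, digitIdxs, List.filterMap_cons, hd, if_pos,
        List.foldl_cons]
      rw [hstep]
      rw [digitIdxs] at hrec
      rw [hrec]
      have : cur ++ [i] ≠ [] := by simp
      rw [if_neg this]
    · by_cases hc : cur = []
      · subst hc
        have hrec := ih (i + 1) all [] hge' hidx' (Or.inl rfl)
          (by intro _ g hg; have := hall rfl g hg; omega)
        simpa [getNumLoopA, hd, digitIdxs] using hrec
      · -- non-digit with pending run: A flushes cur
        have hlen : cur.length ≠ 0 := by simpa [List.length_eq_zero_iff] using hc
        have hgl : cur.getLast? = some (i - 1) := by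
          rcases hcur with h | h
          · exact absurd h hc
          · exact h
        have hrec := ih (i + 1) (all ++ [cur]) [] hge' hidx' (Or.inl rfl)
          (by
            intro _ g hg
            rw [List.getLast?_concat] at hg
            injection hg with hg
            subst hg
            have hcd : cur.getLastD 0 = i - 1 := by
              rw [List.getLastD_eq_getLast?, hgl]; rfl
            omega)
        rw [if_neg hc]
        simpa [getNumLoopA, hd, hlen, digitIdxs] using hrec

-- ===== VERDICT (by name: the statement is the Claim_ definition above) =====
theorem get_number_index_spec : Claim_equal_get_number_index := by
  intro row _
  unfold Spec_get_number_index get_number_index get_number_index_alt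
  have h := key (PySem.List.enumerate row.toList) 0 [] []
    (by
      intro p hp
      rw [PySem.List.mem_enumerate_iff] at hp
      obtain ⟨k, hk, rfl⟩ := hp
      simp)
    (by
      intro k hk
      rw [PySem.List.length_enumerate] at hk
      have := PySem.List.getElem?_enumerate (xs := row.toList) (s := 0) (k := k)
      simp [List.getElem!_eq_getElem?_getD, this, List.getElem?_eq_getElem hk])
    (Or.inl rfl) (by intro _ g hg; simp at hg)
  simp only [reduceIte, List.append_nil] at h
  simpa [get_number_index, get_number_index_alt, finA, digitIdxs] using h
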